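-- pv_equiv track=rewrite | github.com/yasi76/work2 | enhanced_product_location_extractor.py | is_european_company
-- ===== SOURCE A (Python) =====
-- def is_european_company(row):
--     """Check if a company is European-based."""
--     # Check for explicit non-European indicators
--     non_european_indicators = [
--         'united states', 'usa', 'us', 'america', 'california', 'new york',
--         'texas', 'florida', 'illinois', 'pennsylvania', 'ohio', 'georgia',
--         'north carolina', 'michigan', 'virginia', 'washington', 'arizona',
--         'massachusetts', 'tennessee', 'indiana', 'missouri', 'maryland',
--         'wisconsin', 'colorado', 'minnesota', 'south carolina', 'alabama',
--         'louisiana', 'kentucky', 'oregon', 'oklahoma', 'connecticut',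
--         'utah', 'iowa', 'nevada', 'arkansas', 'mississippi', 'kansas',
--         'new mexico', 'nebraska', 'west virginia', 'idaho', 'hawaii',
--         'new hampshire', 'maine', 'montana', 'rhode island', 'delaware',
--         'south dakota', 'north dakota', 'alaska', 'vermont', 'wyoming'
--     ]
--
--     location_fields = [
--         row.get('state', '').lower(),
--         row.get('city', '').lower(),
--         row.get('location_summary', '').lower(),
--         row.get('country', '').lower()
--     ]
--
--     # Check if any field contains non-European indicators
--     for field in location_fields:
--         if field:
--             for indicator in non_european_indicators:
--                 if indicator in field:
--                     return False
--
--     return True  # Default to European if no US indicators found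
-- ===== SOURCE B (Python) =====
-- import re
--
-- _NON_EUROPEAN_INDICATORS = [
--     'united states', 'usa', 'us', 'america', 'california', 'new york',
--     'texas', 'florida', 'illinois', 'pennsylvania', 'ohio', 'georgia',
--     'north carolina', 'michigan', 'virginia', 'washington', 'arizona',
--     'massachusetts', 'tennessee', 'indiana', 'missouri', 'maryland',
--     'wisconsin', 'colorado', 'minnesota', 'south carolina', 'alabama',
--     'louisiana', 'kentucky', 'oregon', 'oklahoma', 'connecticut',
--     'utah', 'iowa', 'nevada', 'arkansas', 'mississippi', 'kansas',
--     'new mexico', 'nebraska', 'west virginia', 'idaho', 'hawaii',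
--     'new hampshire', 'maine', 'montana', 'rhode island', 'delaware',
--     'south dakota', 'north dakota', 'alaska', 'vermont', 'wyoming'
-- ]
--
-- # Indicators contain only letters and spaces, so no escaping is needed.
-- _PATTERN = re.compile('|'.join(_NON_EUROPEAN_INDICATORS))
--
--
-- def is_european_company(row):
--     """Check if a company is European-based."""
--     for key in ('state', 'city', 'location_summary', 'country'):
--         if _PATTERN.search(row.get(key, '').lower()):
--             return False
--     return True
-- ===== Notes on version B (the rewrite author's own statement) =====
-- stated objective: idiomatic
-- what changed: Replaces the nested field-by-indicator substring loop with one precompiled regex alternation searched once per field (a single left-to-right scan per field instead of 55 separate substring searches).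
import Mathlib
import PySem

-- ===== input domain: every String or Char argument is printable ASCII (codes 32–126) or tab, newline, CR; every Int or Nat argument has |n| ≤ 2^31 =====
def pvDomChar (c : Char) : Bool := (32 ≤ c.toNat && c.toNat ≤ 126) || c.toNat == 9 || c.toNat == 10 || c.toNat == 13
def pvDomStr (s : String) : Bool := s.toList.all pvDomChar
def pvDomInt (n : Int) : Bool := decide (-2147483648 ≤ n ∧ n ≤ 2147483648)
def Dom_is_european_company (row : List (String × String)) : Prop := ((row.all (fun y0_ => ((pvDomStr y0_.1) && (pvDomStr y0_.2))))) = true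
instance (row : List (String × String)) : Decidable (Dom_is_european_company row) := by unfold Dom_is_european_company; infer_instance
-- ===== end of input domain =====

-- B replaces A's nested field-by-indicator substring loop with one compiled regex
-- alternation (ported as a single left-to-right position scan) searched once per field;
-- objective: idiomatic.


-- ===== PORT A =====
def nonEuropeanIndicators : List String := [
    "united states", "usa", "us", "america", "california", "new york",
    "texas", "florida", "illinois", "pennsylvania", "ohio", "georgia",
    "north carolina", "michigan", "virginia", "washington", "arizona",
    "massachusetts", "tennessee", "indiana", "missouri", "maryland",
    "wisconsin", "colorado", "minnesota", "south carolina", "alabama",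
    "louisiana", "kentucky", "oregon", "oklahoma", "connecticut",
    "utah", "iowa", "nevada", "arkansas", "mississippi", "kansas",
    "new mexico", "nebraska", "west virginia", "idaho", "hawaii",
    "new hampshire", "maine", "montana", "rhode island", "delaware",
    "south dakota", "north dakota", "alaska", "vermont", "wyoming"]

-- A's outer loop with early return; the inner 'for indicator … return False' loop is List.any.
def pvLoopFieldsA : List String → Bool
  | [] => true
  | f :: rest =>
    if f ≠ "" then
      if nonEuropeanIndicators.any (fun ind => PySem.Str.isIn ind f) then false
      else pvLoopFieldsA rest
    else pvLoopFieldsA rest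

def is_european_company (row : List (String × String)) : Bool :=
  let d : PySem.Dict String String := PySem.Dict.mk row
  let locationFields : List String :=
    [PySem.Str.lower (d.getD "state" ""),
     PySem.Str.lower (d.getD "city" ""),
     PySem.Str.lower (d.getD "location_summary" ""),
     PySem.Str.lower (d.getD "country" "")]
  pvLoopFieldsA locationFields

-- ===== PORT B =====
-- the compiled alternation pattern: the branches of 'u1|u2|…'
def pvPattern : List (List Char) := nonEuropeanIndicators.map String.toList

-- does some branch of the alternation match at the current position?
def pvMatchHere (cs : List Char) : Bool := pvPattern.any (fun b => b.isPrefixOf cs)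

-- re.search: try each start position left to right (exact port of the regex engine's
-- boolean result: a match exists iff some branch matches at some position)
def pvSearch : List Char → Bool
  | [] => pvMatchHere []
  | c :: t => pvMatchHere (c :: t) || pvSearch t

def is_european_company_alt (row : List (String × String)) : Bool :=
  ["state", "city", "location_summary", "country"].all
    (fun k => !pvSearch (PySem.Str.lower ((PySem.Dict.mk row).getD k "")).toList)

-- ===== PRECONDITION & SPEC =====
def Spec_is_european_company (row : List (String × String)) (out : Bool) : Prop := out = is_european_company_alt row
instance (row : List (String × String)) (out : Bool) : Decidable (Spec_is_european_company row out) := by unfold Spec_is_european_company; infer_instance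

-- ===== CLAIM (what is proved, stated in full; the proofs are below) =====
def Claim_equal_is_european_company : Prop := ∀ (row : List (String × String)), Dom_is_european_company row → Spec_is_european_company row (is_european_company row)

-- ===== LEMMAS AND PROOFS =====

-- the position scan finds a match iff some pattern branch is an infix
theorem pvSearch_iff (cs : List Char) :
    pvSearch cs = true ↔ ∃ b ∈ pvPattern, b <:+: cs := by
  induction cs with
  | nil =>
    simp [pvSearch, pvMatchHere, List.isPrefixOf_iff_prefix]
  | cons c t ih =>
    simp only [pvSearch, Bool.or_eq_true, ih, pvMatchHere, List.any_eq_true,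
      List.isPrefixOf_iff_prefix]
    constructor
    · rintro (⟨b, hb, hp⟩ | ⟨b, hb, hi⟩)
      · exact ⟨b, hb, hp.isInfix⟩
      · exact ⟨b, hb, hi.trans (List.infix_cons_iff.mpr (Or.inr (List.infix_refl t)))⟩
    · rintro ⟨b, hb, hi⟩
      rcases List.infix_cons_iff.mp hi with h | h
      · exact Or.inl ⟨b, hb, h⟩
      · exact Or.inr ⟨b, hb, h⟩

-- A's inner indicator loop equals B's single scan, field by field
theorem pvAnyIndicator_eq (f : String) :
    (nonEuropeanIndicators.any (fun ind => PySem.Str.isIn ind f)) = pvSearch f.toList := by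
  rcases Bool.eq_false_or_eq_true (pvSearch f.toList) with h | h <;> rw [h]
  · rcases (pvSearch_iff _).mp h with ⟨b, hb, hi⟩
    rcases List.mem_map.mp hb with ⟨ind, hmem, rfl⟩
    exact List.any_eq_true.mpr ⟨ind, hmem, by
      rw [PySem.Str.isIn_eq, PySem.Chars.isIn_iff_infix]; exact hi⟩
  · rw [Bool.eq_false_iff]
    intro hc
    rw [Bool.eq_false_iff] at h
    apply h
    rw [pvSearch_iff]
    rcases List.any_eq_true.mp hc with ⟨ind, hmem, hin⟩
    rw [PySem.Str.isIn_eq, PySem.Chars.isIn_iff_infix] at hin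
    exact ⟨ind.toList, List.mem_map_of_mem hmem, hin⟩

-- the scan of the empty field fails (every branch is nonempty)
theorem pvSearch_empty : pvSearch [] = false := by decide

theorem pvLoopFieldsA_eq (fs : List String) :
    pvLoopFieldsA fs = fs.all (fun f => !pvSearch f.toList) := by
  induction fs with
  | nil => rfl
  | cons f rest ih =>
    by_cases hf : f = ""
    · subst hf
      simp [pvLoopFieldsA, ih, pvSearch_empty]
    · simp only [pvLoopFieldsA, if_pos (by simpa using hf), pvAnyIndicator_eq, List.all_cons, ih]
      cases pvSearch f.toList <;> simp

-- ===== VERDICT (by name: the statement is the Claim_ definition above) =====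
theorem is_european_company_spec : Claim_equal_is_european_company := by
  intro row _
  unfold Spec_is_european_company is_european_company is_european_company_alt
  rw [pvLoopFieldsA_eq]
  rfl
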